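-- pv_equiv track=rewrite | github.com/brivadeneira/ARQcheros | arqcheros.py | clasificacion_tamano
-- ===== SOURCE A (Python) =====
-- def clasificacion_tamano(dato):
--     tamanos = [0, 20, 40, 60, 80, 120, 160]
--     clasificacion = ['Tamano 1: Muy pequeno', 'Tamano 1: Pequeno', 'Tamano 2: Mediano pequeno', 'Tamano 2: Mediano grande', 'Tamano 3: Grande', 'Tamano 3: Muy grande', 'Tamano 4: Grandísimo']
--     tamanos.reverse()
--     clasificacion.reverse()
--
--     tamano_clasificacion = [(i, j) for i, j in zip(tamanos, clasificacion)]
--     for i, j in tamano_clasificacion: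
--         if dato >= i:
--             return j
-- ===== SOURCE B (Python) =====
-- def clasificacion_tamano(dato):
--     tamanos = [0, 20, 40, 60, 80, 120, 160]
--     clasificacion = ['Tamano 1: Muy pequeno', 'Tamano 1: Pequeno', 'Tamano 2: Mediano pequeno', 'Tamano 2: Mediano grande', 'Tamano 3: Grande', 'Tamano 3: Muy grande', 'Tamano 4: Grandísimo']
--     # binary search (bisect_right): number of thresholds <= dato
--     lo, hi = 0, len(tamanos)
--     while lo < hi:
--         mid = (lo + hi) // 2
--         if dato < tamanos[mid]:
--             hi = mid
--         else:
--             lo = mid + 1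
--     if lo == 0:
--         return None
--     return clasificacion[lo - 1]
-- ===== Notes on version B (the rewrite author's own statement) =====
-- stated objective: alternative
-- what changed: Replaces A's reverse-both-lists-then-linear-scan-for-first-threshold-met with a bisect_right binary search over the ascending thresholds followed by a single index lookup.
import Mathlib
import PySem

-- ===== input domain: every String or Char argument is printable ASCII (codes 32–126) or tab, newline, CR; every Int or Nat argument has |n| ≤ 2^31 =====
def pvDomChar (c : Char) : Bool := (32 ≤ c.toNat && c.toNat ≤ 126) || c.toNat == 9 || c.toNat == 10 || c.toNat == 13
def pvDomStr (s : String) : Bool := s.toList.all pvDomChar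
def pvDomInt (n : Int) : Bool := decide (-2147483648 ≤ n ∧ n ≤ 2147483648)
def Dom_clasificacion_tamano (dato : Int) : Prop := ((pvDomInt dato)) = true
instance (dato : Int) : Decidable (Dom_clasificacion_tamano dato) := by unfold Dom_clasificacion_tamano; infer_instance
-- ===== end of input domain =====

-- ===== PORT A =====
-- B replaces A's reversed-lists linear scan with a bisect_right binary search; alternative decomposition, same cost.
-- A's loop: scan the (reversed-threshold, reversed-category) pairs, return the first category whose threshold is met.
def pvFindA (dato : Int) : List (Int × String) → Option String
  | [] => none
  | (i, j) :: rest => if dato ≥ i then some j else pvFindA dato rest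

def clasificacion_tamano (dato : Int) : Option String :=
  let tamanos : List Int := [0, 20, 40, 60, 80, 120, 160]
  let clasificacion : List String := ["Tamano 1: Muy pequeno", "Tamano 1: Pequeno", "Tamano 2: Mediano pequeno", "Tamano 2: Mediano grande", "Tamano 3: Grande", "Tamano 3: Muy grande", "Tamano 4: Grandísimo"]
  let tamanos := tamanos.reverse
  let clasificacion := clasificacion.reverse
  let tamano_clasificacion := tamanos.zip clasificacion
  pvFindA dato tamano_clasificacion

-- ===== PORT B =====
-- B's while-loop (bisect_right): tamanos[mid] is always in range, so getD 0 is exact.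
def pvBisect (dato : Int) (tamanos : List Int) (lo hi : Nat) : Nat :=
  if h : lo < hi then
    let mid := (lo + hi) / 2
    if dato < tamanos.getD mid 0 then pvBisect dato tamanos lo mid
    else pvBisect dato tamanos (mid + 1) hi
  else lo
termination_by hi - lo
decreasing_by all_goals omega

def clasificacion_tamano_alt (dato : Int) : Option String :=
  let tamanos : List Int := [0, 20, 40, 60, 80, 120, 160]
  let clasificacion : List String := ["Tamano 1: Muy pequeno", "Tamano 1: Pequeno", "Tamano 2: Mediano pequeno", "Tamano 2: Mediano grande", "Tamano 3: Grande", "Tamano 3: Muy grande", "Tamano 4: Grandísimo"]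
  let lo := pvBisect dato tamanos 0 tamanos.length
  if lo = 0 then none
  else clasificacion.getD (lo - 1) ""  -- clasificacion[lo-1]; lo-1 ≤ 6 < length, so getD is exact

-- ===== PRECONDITION & SPEC =====
def Spec_clasificacion_tamano (dato : Int) (out : Option String) : Prop := out = clasificacion_tamano_alt dato
instance (dato : Int) (out : Option String) : Decidable (Spec_clasificacion_tamano dato out) := by unfold Spec_clasificacion_tamano; infer_instance

-- ===== CLAIM (what is proved, stated in full; the proofs are below) =====
def Claim_equal_clasificacion_tamano : Prop := ∀ (dato : Int), Dom_clasificacion_tamano dato → Spec_clasificacion_tamano dato (clasificacion_tamano dato)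

-- ===== LEMMAS AND PROOFS =====

theorem pv_eq (dato : Int) : clasificacion_tamano dato = clasificacion_tamano_alt dato := by
  by_cases h0 : dato < 0
  · simp [clasificacion_tamano, clasificacion_tamano_alt, pvFindA, pvBisect,
        show dato < 0 from by omega, show ¬ dato ≥ 0 from by omega, show dato < 20 from by omega, show ¬ dato ≥ 20 from by omega, show dato < 40 from by omega, show ¬ dato ≥ 40 from by omega, show dato < 60 from by omega, show ¬ dato ≥ 60 from by omega, show dato < 80 from by omega, show ¬ dato ≥ 80 from by omega, show dato < 120 from by omega, show ¬ dato ≥ 120 from by omega, show dato < 160 from by omega, show ¬ dato ≥ 160 from by omega]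
  by_cases h1 : dato < 20
  · simp [clasificacion_tamano, clasificacion_tamano_alt, pvFindA, pvBisect,
        show ¬ dato < 0 from by omega, show dato ≥ 0 from by omega, show dato < 20 from by omega, show ¬ dato ≥ 20 from by omega, show dato < 40 from by omega, show ¬ dato ≥ 40 from by omega, show dato < 60 from by omega, show ¬ dato ≥ 60 from by omega, show dato < 80 from by omega, show ¬ dato ≥ 80 from by omega, show dato < 120 from by omega, show ¬ dato ≥ 120 from by omega, show dato < 160 from by omega, show ¬ dato ≥ 160 from by omega]
  by_cases h2 : dato < 40
  · simp [clasificacion_tamano, clasificacion_tamano_alt, pvFindA, pvBisect,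
        show ¬ dato < 0 from by omega, show dato ≥ 0 from by omega, show ¬ dato < 20 from by omega, show dato ≥ 20 from by omega, show dato < 40 from by omega, show ¬ dato ≥ 40 from by omega, show dato < 60 from by omega, show ¬ dato ≥ 60 from by omega, show dato < 80 from by omega, show ¬ dato ≥ 80 from by omega, show dato < 120 from by omega, show ¬ dato ≥ 120 from by omega, show dato < 160 from by omega, show ¬ dato ≥ 160 from by omega]
  by_cases h3 : dato < 60
  · simp [clasificacion_tamano, clasificacion_tamano_alt, pvFindA, pvBisect,
        show ¬ dato < 0 from by omega, show dato ≥ 0 from by omega, show ¬ dato < 20 from by omega, show dato ≥ 20 from by omega, show ¬ dato < 40 from by omega, show dato ≥ 40 from by omega, show dato < 60 from by omega, show ¬ dato ≥ 60 from by omega, show dato < 80 from by omega, show ¬ dato ≥ 80 from by omega, show dato < 120 from by omega, show ¬ dato ≥ 120 from by omega, show dato < 160 from by omega, show ¬ dato ≥ 160 from by omega]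
  by_cases h4 : dato < 80
  · simp [clasificacion_tamano, clasificacion_tamano_alt, pvFindA, pvBisect,
        show ¬ dato < 0 from by omega, show dato ≥ 0 from by omega, show ¬ dato < 20 from by omega, show dato ≥ 20 from by omega, show ¬ dato < 40 from by omega, show dato ≥ 40 from by omega, show ¬ dato < 60 from by omega, show dato ≥ 60 from by omega, show dato < 80 from by omega, show ¬ dato ≥ 80 from by omega, show dato < 120 from by omega, show ¬ dato ≥ 120 from by omega, show dato < 160 from by omega, show ¬ dato ≥ 160 from by omega]
  by_cases h5 : dato < 120
  · simp [clasificacion_tamano, clasificacion_tamano_alt, pvFindA, pvBisect,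
        show ¬ dato < 0 from by omega, show dato ≥ 0 from by omega, show ¬ dato < 20 from by omega, show dato ≥ 20 from by omega, show ¬ dato < 40 from by omega, show dato ≥ 40 from by omega, show ¬ dato < 60 from by omega, show dato ≥ 60 from by omega, show ¬ dato < 80 from by omega, show dato ≥ 80 from by omega, show dato < 120 from by omega, show ¬ dato ≥ 120 from by omega, show dato < 160 from by omega, show ¬ dato ≥ 160 from by omega]
  by_cases h6 : dato < 160
  · simp [clasificacion_tamano, clasificacion_tamano_alt, pvFindA, pvBisect,
        show ¬ dato < 0 from by omega, show dato ≥ 0 from by omega, show ¬ dato < 20 from by omega, show dato ≥ 20 from by omega, show ¬ dato < 40 from by omega, show dato ≥ 40 from by omega, show ¬ dato < 60 from by omega, show dato ≥ 60 from by omega, show ¬ dato < 80 from by omega, show dato ≥ 80 from by omega, show ¬ dato < 120 from by omega, show dato ≥ 120 from by omega, show dato < 160 from by omega, show ¬ dato ≥ 160 from by omega]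
  simp [clasificacion_tamano, clasificacion_tamano_alt, pvFindA, pvBisect,
      show ¬ dato < 0 from by omega, show dato ≥ 0 from by omega, show ¬ dato < 20 from by omega, show dato ≥ 20 from by omega, show ¬ dato < 40 from by omega, show dato ≥ 40 from by omega, show ¬ dato < 60 from by omega, show dato ≥ 60 from by omega, show ¬ dato < 80 from by omega, show dato ≥ 80 from by omega, show ¬ dato < 120 from by omega, show dato ≥ 120 from by omega, show ¬ dato < 160 from by omega, show dato ≥ 160 from by omega]

-- ===== VERDICT (by name: the statement is the Claim_ definition above) =====
theorem clasificacion_tamano_spec : Claim_equal_clasificacion_tamano := by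
  intro dato _
  unfold Spec_clasificacion_tamano
  exact pv_eq dato
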